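-- pv_equiv track=rewrite | github.com/WingsJackF/EoA_V1 | main.py | _format_full_test_metrics
-- ===== SOURCE A (Python) =====
-- from typing import List, Dict, Any, Optional
--
-- def _format_full_test_metrics(metrics: Any) -> str:
--     if not isinstance(metrics, dict):
--         return str(metrics)
--     preferred_keys = (
--         "combined_score",
--         "objective",
--         "teacher_score",
--         "student_score",
--         "gap_percent",
--         "average_reward",
--         "avg_bins",
--         "l1_bound",
--         "excess_percent",
--         "min_max_ratio",
--     )
--     parts: List[str] = []
--     seen = set()
--     for key in preferred_keys:
--         if key in metrics:
--             parts.append(f"{key}={metrics.get(key)}")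
--             seen.add(key)
--     for key, value in metrics.items():
--         if key in seen:
--             continue
--         parts.append(f"{key}={value}")
--     return ", ".join(parts)
-- ===== SOURCE B (Python) =====
-- from typing import Any, List
--
--
-- def _format_full_test_metrics(metrics: Any) -> str:
--     if not isinstance(metrics, dict):
--         return str(metrics)
--     preferred_keys = (
--         "combined_score",
--         "objective",
--         "teacher_score",
--         "student_score",
--         "gap_percent",
--         "average_reward",
--         "avg_bins",
--         "l1_bound",
--         "excess_percent",
--         "min_max_ratio",
--     )
--     n = len(preferred_keys)
--     priority = {key: i for i, key in enumerate(preferred_keys)}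
--     buckets: List[List[str]] = [[] for _ in range(n + 1)]
--     for key, value in metrics.items():
--         buckets[priority.get(key, n)].append(f"{key}={value}")
--     return ", ".join(part for bucket in buckets for part in bucket)
-- ===== Notes on version B (the rewrite author's own statement) =====
-- stated objective: alternative
-- what changed: A makes two selective passes (scan the preferred-key tuple probing the dict, then rescan the items skipping a seen-set); B makes a single pass over the items dropping each formatted entry into a priority bucket (index from a precomputed priority dict) and concatenates the buckets.
import Mathlib
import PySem

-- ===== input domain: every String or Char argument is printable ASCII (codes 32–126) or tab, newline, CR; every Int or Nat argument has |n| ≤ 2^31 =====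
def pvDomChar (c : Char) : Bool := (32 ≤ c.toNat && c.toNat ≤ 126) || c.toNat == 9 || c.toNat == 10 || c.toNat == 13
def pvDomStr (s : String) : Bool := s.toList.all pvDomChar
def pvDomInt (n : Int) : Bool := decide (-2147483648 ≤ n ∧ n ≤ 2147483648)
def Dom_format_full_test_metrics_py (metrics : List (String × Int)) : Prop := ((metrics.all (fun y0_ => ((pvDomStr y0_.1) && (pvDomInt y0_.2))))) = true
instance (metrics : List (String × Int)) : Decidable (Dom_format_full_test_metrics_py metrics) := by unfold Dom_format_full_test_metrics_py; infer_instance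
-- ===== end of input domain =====

-- B replaces A's two selective passes (preferred-key scan + seen-set scan) by a single
-- pass that drops each item into a priority bucket and concatenates the buckets (alternative, same cost).

-- shared constants of both Pythons: the preferred-key tuple and the f-string "{k}={v}"
def pvKeys : List String :=
  ["combined_score", "objective", "teacher_score", "student_score", "gap_percent",
   "average_reward", "avg_bins", "l1_bound", "excess_percent", "min_max_ratio"]

def pvFmt (k : String) (v : Int) : String := PySem.Str.join "" [k, "=", PySem.Int.toStr v]

-- ===== PORT A =====
-- body of A's first loop (over preferred_keys): append "k=v" if present, record k in seen
def pvStepA1 (d : PySem.Dict String Int) (acc : List String × PySem.Set String) (key : String) :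
    List String × PySem.Set String :=
  if d.contains key then (acc.1 ++ [pvFmt key (d.getD key 0)], PySem.Set.add acc.2 key) else acc

-- body of A's second loop (over metrics.items()): skip keys already seen
def pvStepA2 (seen : PySem.Set String) (ps : List String) (kv : String × Int) : List String :=
  if PySem.Set.contains seen kv.1 then ps else ps ++ [pvFmt kv.1 kv.2]

def format_full_test_metrics_py (metrics : List (String × Int)) : String :=
  let d := PySem.Dict.mk metrics
  let first := pvKeys.foldl (pvStepA1 d) ([], PySem.Set.empty)
  PySem.Str.join ", " (metrics.foldl (pvStepA2 first.2) first.1)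

-- ===== PORT B =====
-- priority = {key: i for i, key in enumerate(preferred_keys)}
def pvPriority : PySem.Dict String Int :=
  (PySem.List.enumerate pvKeys).foldl
    (fun (dct : PySem.Dict String Int) p => dct.insert p.2 p.1) PySem.Dict.empty

-- body of B's single loop: buckets[priority.get(key, n)].append(f"{key}={value}")
def pvStepB (bs : List (List String)) (kv : String × Int) : List (List String) :=
  let i := pvPriority.getD kv.1 (pvKeys.length : Int)
  PySem.List.pySetD bs i (PySem.List.pyGetD bs i [] ++ [pvFmt kv.1 kv.2])

def format_full_test_metrics_py_alt (metrics : List (String × Int)) : String :=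
  let buckets := metrics.foldl pvStepB (List.replicate (pvKeys.length + 1) [])
  PySem.Str.join ", " (buckets.flatMap (fun b => b))

-- ===== PRECONDITION & SPEC =====
-- Pre_ excludes association lists with duplicate keys, which do not represent any Python
-- dict (the Python argument is a dict, so its keys are necessarily distinct).
def Pre_format_full_test_metrics_py (metrics : List (String × Int)) : Prop :=
  (metrics.map Prod.fst).Nodup
instance (metrics : List (String × Int)) : Decidable (Pre_format_full_test_metrics_py metrics) := by
  unfold Pre_format_full_test_metrics_py; infer_instance

def pvWitness_format_full_test_metrics_py : (List (String × Int)) :=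
  [("objective", 3), ("epoch", -1), ("combined_score", 7)]

def Spec_format_full_test_metrics_py (metrics : List (String × Int)) (out : String) : Prop := out = format_full_test_metrics_py_alt metrics
instance (metrics : List (String × Int)) (out : String) : Decidable (Spec_format_full_test_metrics_py metrics out) := by unfold Spec_format_full_test_metrics_py; infer_instance

-- ===== CLAIM (what is proved, stated in full; the proofs are below) =====
def Claim_equal_format_full_test_metrics_py : Prop := ∀ (metrics : List (String × Int)), Dom_format_full_test_metrics_py metrics → Pre_format_full_test_metrics_py metrics → Spec_format_full_test_metrics_py metrics (format_full_test_metrics_py metrics)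

-- ===== LEMMAS AND PROOFS =====

-- priority.get(k, n) is the index of k in preferred_keys, or n = 10 when absent
def pvPrio (k : String) : Int := (List.idxOf k pvKeys : Int)

-- bucket j of the input l: the formatted items whose key has priority j
def pvG (l : List (String × Int)) (j : Nat) : List String :=
  (l.filter (fun kv => pvPrio kv.1 == (j : Int))).map (fun kv => pvFmt kv.1 kv.2)

lemma pvPriority_eq : pvPriority = PySem.Dict.mk
    [("combined_score", 0), ("objective", 1), ("teacher_score", 2), ("student_score", 3),
     ("gap_percent", 4), ("average_reward", 5), ("avg_bins", 6), ("l1_bound", 7),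
     ("excess_percent", 8), ("min_max_ratio", 9)] := by decide

set_option maxRecDepth 10000 in
set_option maxHeartbeats 2000000 in
lemma pvPriority_getD (k : String) : pvPriority.getD k 10 = pvPrio k := by
  rw [pvPriority_eq]
  simp only [PySem.Dict.getD_eq_get?_getD, PySem.Dict.get?_mk_cons, pvPrio, pvKeys,
    List.idxOf_cons, Bool.cond_eq_ite]
  split_ifs <;> simp [PySem.Dict.get?]

lemma pvStepB_eq (bs : List (List String)) (kv : String × Int) :
    pvStepB bs kv =
      PySem.List.pySetD bs (pvPrio kv.1) (PySem.List.pyGetD bs (pvPrio kv.1) [] ++ [pvFmt kv.1 kv.2]) := by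
  have h : (pvKeys.length : Int) = 10 := by decide
  simp only [pvStepB, h, pvPriority_getD]

lemma pvIdx_le (k : String) : List.idxOf k pvKeys ≤ 10 := by
  have := List.idxOf_le_length (a := k) (l := pvKeys)
  simpa [pvKeys] using this

lemma pvG_append_singleton (l : List (String × Int)) (x : String × Int) (j : Nat) :
    pvG (l ++ [x]) j = pvG l j ++ (if pvPrio x.1 == (j : Int) then [pvFmt x.1 x.2] else []) := by
  simp only [pvG, List.filter_append, List.map_append]
  by_cases h : pvPrio x.1 == (j : Int) <;> simp [h]

lemma B_buckets (l : List (String × Int)) :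
    l.foldl pvStepB (List.replicate 11 ([] : List String)) = (List.range 11).map (pvG l) := by
  induction l using List.reverseRecOn with
  | nil => decide
  | append_singleton l x ih =>
    rw [List.foldl_append, List.foldl_cons, List.foldl_nil, ih, pvStepB_eq]
    have hm : List.idxOf x.1 pvKeys < 11 := Nat.lt_succ_of_le (pvIdx_le x.1)
    have hprio : pvPrio x.1 = ((List.idxOf x.1 pvKeys : Nat) : Int) := rfl
    rw [hprio, PySem.List.pySetD_natCast, PySem.List.pyGetD_of_nonneg _ _ (Int.natCast_nonneg _),
      Int.toNat_natCast]
    have hget : (List.map (pvG l) (List.range 11)).getD (List.idxOf x.1 pvKeys) [] =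
        pvG l (List.idxOf x.1 pvKeys) := by
      rw [List.getD_eq_getElem _ _ (by simpa using hm)]
      simp
    rw [hget]
    apply List.ext_getElem
    · simp
    · intro p hp hp'
      simp only [List.length_map, List.length_range] at hp'
      simp only [List.getElem_set, List.getElem_map, List.getElem_range]
      rw [pvG_append_singleton]
      by_cases hpe : List.idxOf x.1 pvKeys = p
      · simp [hpe, hprio]
      · have hb : (pvPrio x.1 == (p : Int)) = false := by
          simp [hprio, hpe]
        simp [hpe, hb]

lemma A1_fst (d : PySem.Dict String Int) :
    ∀ (ks : List String) (ps : List String) (s : PySem.Set String),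
      (ks.foldl (pvStepA1 d) (ps, s)).1 =
        ps ++ ks.flatMap (fun k => if d.contains k then [pvFmt k (d.getD k 0)] else []) := by
  intro ks
  induction ks with
  | nil => intro ps s; simp
  | cons k ks ih =>
    intro ps s
    by_cases h : d.contains k <;> simp [pvStepA1, h, ih]

lemma A1_snd_mem (d : PySem.Dict String Int) :
    ∀ (ks : List String) (ps : List String) (s : PySem.Set String) (k' : String),
      k' ∈ (ks.foldl (pvStepA1 d) (ps, s)).2 ↔ k' ∈ s ∨ (k' ∈ ks ∧ d.contains k' = true) := by
  intro ks
  induction ks with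
  | nil => intro ps s k'; simp
  | cons k ks ih =>
    intro ps s k'
    by_cases h : d.contains k
    · simp only [List.foldl_cons, pvStepA1, h, if_pos]
      rw [ih]
      constructor
      · rintro (hs | hrest)
        · rcases (PySem.Set.mem_add s k k').mp hs with hs | rfl
          · exact Or.inl hs
          · exact Or.inr ⟨by simp, h⟩
        · exact Or.inr ⟨List.mem_cons_of_mem _ hrest.1, hrest.2⟩
      · rintro (hs | ⟨hmem, hc⟩)
        · exact Or.inl ((PySem.Set.mem_add s k k').mpr (Or.inl hs))
        · rcases List.mem_cons.mp hmem with rfl | hmem'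
          · exact Or.inl ((PySem.Set.mem_add _ _ _).mpr (Or.inr rfl))
          · exact Or.inr ⟨hmem', hc⟩
    · simp only [List.foldl_cons, pvStepA1, h]
      rw [ih]
      constructor
      · rintro (hs | hrest)
        · exact Or.inl hs
        · exact Or.inr ⟨List.mem_cons_of_mem _ hrest.1, hrest.2⟩
      · rintro (hs | ⟨hmem, hc⟩)
        · exact Or.inl hs
        · rcases List.mem_cons.mp hmem with rfl | hmem'
          · simp [h] at hc
          · exact Or.inr ⟨hmem', hc⟩

lemma filter_single (metrics : List (String × Int))
    (hnd : (metrics.map Prod.fst).Nodup) (k : String) :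
    ((metrics.filter (fun kv => kv.1 == k)).map (fun kv => pvFmt kv.1 kv.2)) =
      (if (PySem.Dict.mk metrics).contains k
       then [pvFmt k ((PySem.Dict.mk metrics).getD k 0)] else []) := by
  induction metrics with
  | nil => simp [PySem.Dict.contains]
  | cons a rest ih =>
    simp only [List.map_cons, List.nodup_cons] at hnd
    by_cases h : a.1 == k
    · have hk : a.1 = k := by simpa using h
      have hnone : rest.filter (fun kv => kv.1 == k) = [] := by
        rw [List.filter_eq_nil_iff]
        intro kv hkv
        simp only [beq_iff_eq]
        intro he
        apply hnd.1
        rw [hk, ← he]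
        exact List.mem_map_of_mem hkv
      have hc : (PySem.Dict.mk (a :: rest)).contains k = true := by
        simp [← hk]
      have hg : (PySem.Dict.mk (a :: rest)).getD k 0 = a.2 := by
        rw [PySem.Dict.getD_eq_get?_getD]
        rw [show (PySem.Dict.mk (a :: rest)) = PySem.Dict.mk ((a.1, a.2) :: rest) by simp]
        rw [PySem.Dict.get?_mk_cons]
        simp [h]
      simp [hnone, hc, hg, hk]
    · have hc : (PySem.Dict.mk (a :: rest)).contains k = (PySem.Dict.mk rest).contains k := by
        rw [PySem.Dict.contains_eq_isSome_get?, PySem.Dict.contains_eq_isSome_get?,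
          show (PySem.Dict.mk (a :: rest)) = PySem.Dict.mk ((a.1, a.2) :: rest) by simp,
          PySem.Dict.get?_mk_cons]
        simp [h]
      have hg : ∀ v0 : Int, (PySem.Dict.mk (a :: rest)).getD k v0 = (PySem.Dict.mk rest).getD k v0 := by
        intro v0
        rw [PySem.Dict.getD_eq_get?_getD, PySem.Dict.getD_eq_get?_getD,
          show (PySem.Dict.mk (a :: rest)) = PySem.Dict.mk ((a.1, a.2) :: rest) by simp,
          PySem.Dict.get?_mk_cons]
        simp [h]
      simp only [List.filter_cons, h, if_neg, Bool.false_eq_true, not_false_iff, ih hnd.2, hc, hg]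

lemma pvPrio_eq_iff (k : String) (j : Nat) (hj : j < 10) :
    pvPrio k = (j : Int) ↔ k = pvKeys.getD j "" := by
  have hlen : pvKeys.length = 10 := by decide
  have hjl : j < pvKeys.length := by omega
  have hnd : pvKeys.Nodup := by decide
  constructor
  · intro h
    have hidx : List.idxOf k pvKeys = j := by
      simpa [pvPrio, Int.natCast_inj] using h
    subst hidx
    rw [List.getD_eq_getElem _ _ hjl, List.getElem_idxOf hjl]
  · intro h
    have : k = pvKeys[j] := by rw [h, List.getD_eq_getElem _ _ hjl]
    subst this
    simp [pvPrio, List.Nodup.idxOf_getElem hnd j hjl]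

lemma pvPrio_eq_ten_iff (k : String) : pvPrio k = (10 : Int) ↔ k ∉ pvKeys := by
  have hlen : pvKeys.length = 10 := by decide
  constructor
  · intro h hmem
    have : List.idxOf k pvKeys < pvKeys.length := List.idxOf_lt_length_of_mem hmem
    have h10 : List.idxOf k pvKeys = 10 := by
      unfold pvPrio at h; exact_mod_cast h
    omega
  · intro h
    simp [pvPrio, List.idxOf_eq_length h, hlen]

lemma per_key (metrics : List (String × Int)) (hnd : (metrics.map Prod.fst).Nodup)
    (j : Nat) (hj : j < 10) :
    pvG metrics j =
      (if (PySem.Dict.mk metrics).contains (pvKeys.getD j "")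
       then [pvFmt (pvKeys.getD j "") ((PySem.Dict.mk metrics).getD (pvKeys.getD j "") 0)]
       else []) := by
  rw [← filter_single metrics hnd]
  unfold pvG
  congr 1
  apply List.filter_congr
  intro kv _
  have := pvPrio_eq_iff kv.1 j hj
  simp [this]

lemma bucket_ten (metrics : List (String × Int)) :
    pvG metrics 10 = (metrics.filter (fun kv => !(decide (kv.1 ∈ pvKeys)))).map
      (fun kv => pvFmt kv.1 kv.2) := by
  unfold pvG
  congr 1
  apply List.filter_congr
  intro kv _
  have := pvPrio_eq_ten_iff kv.1
  by_cases h : kv.1 ∈ pvKeys <;> simp [this, h]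

-- ===== VERDICT (by name: the statement is the Claim_ definition above) =====
theorem format_full_test_metrics_py_spec : Claim_equal_format_full_test_metrics_py := by
  intro metrics _ hpre
  unfold Spec_format_full_test_metrics_py
  unfold format_full_test_metrics_py format_full_test_metrics_py_alt
  simp only []
  congr 1
  -- names
  have hone : pvKeys.length + 1 = 11 := by decide
  rw [hone, B_buckets]
  -- flatten the B side: buckets are pvG metrics 0 … pvG metrics 10
  rw [show (List.map (pvG metrics) (List.range 11)).flatMap (fun b => b)
        = (List.range 11).flatMap (pvG metrics) by
      rw [List.flatMap_map]]
  -- A's second loop is an append-if fold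
  have hfun : pvStepA2 (pvKeys.foldl (pvStepA1 (PySem.Dict.mk metrics)) ([], PySem.Set.empty)).2
      = fun ps kv => if (!(PySem.Set.contains (pvKeys.foldl (pvStepA1 (PySem.Dict.mk metrics)) ([], PySem.Set.empty)).2 kv.1)) = true
                     then ps ++ [pvFmt kv.1 kv.2] else ps := by
    funext ps kv
    unfold pvStepA2
    cases PySem.Set.contains (pvKeys.foldl (pvStepA1 (PySem.Dict.mk metrics)) ([], PySem.Set.empty)).2 kv.1 <;> simp
  rw [hfun, PySem.List.foldl_append_if, A1_fst]
  -- the seen set after the first loop holds exactly the preferred keys present in metrics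
  have hseen : ∀ k', k' ∈ (pvKeys.foldl (pvStepA1 (PySem.Dict.mk metrics)) ([], PySem.Set.empty)).2
      ↔ (k' ∈ pvKeys ∧ (PySem.Dict.mk metrics).contains k' = true) := by
    intro k'
    rw [A1_snd_mem]
    simp [PySem.Set.empty]
  have hfilter : metrics.filter
        (fun kv => !(PySem.Set.contains (pvKeys.foldl (pvStepA1 (PySem.Dict.mk metrics)) ([], PySem.Set.empty)).2 kv.1))
      = metrics.filter (fun kv => !(decide (kv.1 ∈ pvKeys))) := by
    apply List.filter_congr
    intro kv hkv
    have hdc : (PySem.Dict.mk metrics).contains kv.1 = true := by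
      rw [PySem.Dict.contains_iff_mem_keys]
      simp only [PySem.Dict.keys]
      exact List.mem_map_of_mem hkv
    congr 1
    by_cases hm : kv.1 ∈ pvKeys
    · simp only [hm, decide_true]
      rw [PySem.Set.contains_iff]
      rw [hseen]
      exact ⟨hm, hdc⟩
    · simp only [hm, decide_false]
      rw [← Bool.not_eq_true, PySem.Set.contains_iff, hseen]
      tauto
  rw [hfilter, ← bucket_ten]
  -- expand both flatMaps over the ten preferred keys and rewrite bucket by bucket
  have e0 := per_key metrics hpre 0 (by norm_num)
  have e1 := per_key metrics hpre 1 (by norm_num)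
  have e2 := per_key metrics hpre 2 (by norm_num)
  have e3 := per_key metrics hpre 3 (by norm_num)
  have e4 := per_key metrics hpre 4 (by norm_num)
  have e5 := per_key metrics hpre 5 (by norm_num)
  have e6 := per_key metrics hpre 6 (by norm_num)
  have e7 := per_key metrics hpre 7 (by norm_num)
  have e8 := per_key metrics hpre 8 (by norm_num)
  have e9 := per_key metrics hpre 9 (by norm_num)
  simp only [pvKeys, List.getD_cons_zero, List.getD_cons_succ] at e0 e1 e2 e3 e4 e5 e6 e7 e8 e9
  rw [show List.range 11 = [0,1,2,3,4,5,6,7,8,9,10] by decide]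
  simp only [pvKeys, List.flatMap_cons, List.flatMap_nil, List.append_nil, List.nil_append,
    e0, e1, e2, e3, e4, e5, e6, e7, e8, e9, List.append_assoc]
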